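-- pv_equiv track=rewrite | github.com/Pescano/Advent-Of-Code | 2024/Day-07/Solution1.py | get_valid_operations_result
-- ===== SOURCE A (Python) =====
-- import itertools
--
-- def validated_operation(key, values, operations):
--     result = int(values[0])
--     for i in range(len(operations)):
--         if operations[i] == '+':
--             result += int(values[i + 1])
--         elif operations[i] == '*':
--             result *= int(values[i + 1])
--     return result == int(key)
--
-- def get_valid_operations_result(input_file):
-- 	valid_operations_sum = 0
-- 	for key in input_file:
-- 		operations = itertools.product(['+', '*'], repeat=len(input_file[key]) - 1)
-- 		for operation in operations:
-- 			if validated_operation(key, input_file[key], operation):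
-- 				valid_operations_sum += int(key)
-- 				break
-- 	return valid_operations_sum
-- ===== SOURCE B (Python) =====
-- def get_valid_operations_result(input_file):
--     total = 0
--     for key, vals in input_file.items():
--         reachable = {vals[0]}
--         for v in vals[1:]:
--             reachable = {r + v for r in reachable} | {r * v for r in reachable}
--         if key in reachable:
--             total += key
--     return total
-- ===== Notes on version B (the rewrite author's own statement) =====
-- stated objective: faster
-- what changed: A enumerates all 2^(n-1) operator tuples per line (itertools.product) and evaluates each with an indexed loop; B does a single left-to-right DP keeping the SET of values reachable so far, so duplicate intermediate results collapse and no tuple list is ever built.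
import Mathlib
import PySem

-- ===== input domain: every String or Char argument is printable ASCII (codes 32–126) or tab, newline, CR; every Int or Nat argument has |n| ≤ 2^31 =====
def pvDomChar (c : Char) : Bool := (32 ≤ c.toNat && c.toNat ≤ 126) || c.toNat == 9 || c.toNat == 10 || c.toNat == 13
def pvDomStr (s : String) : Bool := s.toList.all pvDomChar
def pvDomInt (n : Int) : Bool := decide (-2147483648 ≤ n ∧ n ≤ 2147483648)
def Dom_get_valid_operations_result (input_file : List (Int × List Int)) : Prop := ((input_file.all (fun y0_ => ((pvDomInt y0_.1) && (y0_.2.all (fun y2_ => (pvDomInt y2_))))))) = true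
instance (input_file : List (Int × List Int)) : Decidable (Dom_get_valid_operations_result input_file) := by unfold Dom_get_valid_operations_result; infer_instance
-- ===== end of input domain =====

-- B replaces A's enumeration of all 2^(n-1) operator tuples by a set-DP over reachable values (faster; equal on dict-shaped inputs with nonempty value lists).


-- ===== PORT A =====
-- itertools.product(['+','*'], repeat=n): leftmost coordinate varies slowest — exact order.
def prodPM : Nat → List (List Char)
  | 0 => [[]]
  | n + 1 => (['+', '*'] : List Char).flatMap (fun c => (prodPM n).map (c :: ·))

-- validated_operation(key, values, operations); the loop indices i and i+1 are
-- nonnegative and in range whenever A does not raise (Pre_ below), so getD is exact there.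
def validated_operation (key : Int) (values : List Int) (operations : List Char) : Bool :=
  let result := (List.range operations.length).foldl
    (fun result i =>
      if operations.getD i ' ' = '+' then result + values.getD (i + 1) 0
      else if operations.getD i ' ' = '*' then result * values.getD (i + 1) 0
      else result)
    (values.getD 0 0)
  result == key

-- the inner 'for operation in operations: if …: sum += key; break' loop: did any tuple validate?
def anyValidated (key : Int) (values : List Int) : List (List Char) → Bool
  | [] => false
  | op :: rest => if validated_operation key values op then true else anyValidated key values rest

def get_valid_operations_result (input_file : List (Int × List Int)) : Int :=
  input_file.foldl
    (fun valid_operations_sum kv =>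
      let values := (input_file.lookup kv.1).getD []   -- input_file[key]: first match in the assoc list
      if anyValidated kv.1 values (prodPM (values.length - 1)) then valid_operations_sum + kv.1
      else valid_operations_sum)
    0

-- ===== PORT B =====
-- one DP step: {r + v for r in reachable} | {r * v for r in reachable}
def reachStep (s : PySem.Set Int) (v : Int) : PySem.Set Int :=
  PySem.Set.union (PySem.Set.ofList (s.map (· + v))) (s.map (· * v))

def get_valid_operations_result_alt (input_file : List (Int × List Int)) : Int :=
  input_file.foldl
    (fun total kv =>
      -- reachable = {vals[0]}; for v in vals[1:]: …   (vals[1:] = drop 1 on a list)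
      let reachable := (kv.2.drop 1).foldl reachStep (PySem.Set.ofList [kv.2.getD 0 0])
      if kv.1 ∈ reachable then total + kv.1 else total)
    0

-- ===== PRECONDITION & SPEC =====
-- Pre_ excludes (a) lines whose value list is empty, on which A raises ValueError
-- (itertools.product with repeat=-1) and B raises IndexError, and (b) duplicate keys,
-- an artefact of representing a Python dict (which cannot hold them) as an assoc list.
def Pre_get_valid_operations_result (input_file : List (Int × List Int)) : Prop :=
  (input_file.map Prod.fst).Nodup ∧ ∀ kv ∈ input_file, kv.2 ≠ []

instance (input_file : List (Int × List Int)) : Decidable (Pre_get_valid_operations_result input_file) := by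
  unfold Pre_get_valid_operations_result; infer_instance

def pvWitness_get_valid_operations_result : (List (Int × List Int)) :=
  [(6, [2, 3]), (7, [1, 2, 3]), (5, [4, 2])]

def Spec_get_valid_operations_result (input_file : List (Int × List Int)) (out : Int) : Prop := out = get_valid_operations_result_alt input_file
instance (input_file : List (Int × List Int)) (out : Int) : Decidable (Spec_get_valid_operations_result input_file out) := by unfold Spec_get_valid_operations_result; infer_instance

-- ===== CLAIM (what is proved, stated in full; the proofs are below) =====
def Claim_equal_get_valid_operations_result : Prop := ∀ (input_file : List (Int × List Int)), Dom_get_valid_operations_result input_file → Pre_get_valid_operations_result input_file → Spec_get_valid_operations_result input_file (get_valid_operations_result input_file)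

-- ===== LEMMAS AND PROOFS =====

-- structural evaluation of one operator tuple zipped with the remaining values
def evalZip (r : Int) : List (Char × Int) → Int
  | [] => r
  | (c, v) :: t => evalZip (if c = '+' then r + v else if c = '*' then r * v else r) t

lemma anyValidated_eq_any (key : Int) (values : List Int) (l : List (List Char)) :
    anyValidated key values l = l.any (validated_operation key values) := by
  induction l with
  | nil => rfl
  | cons op rest ih =>
    simp only [anyValidated, List.any_cons, ih]
    split_ifs with h <;> simp [h]

lemma mem_prodPM {n : Nat} {ops : List Char} :
    ops ∈ prodPM n ↔ ops.length = n ∧ ∀ c ∈ ops, c = '+' ∨ c = '*' := by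
  induction n generalizing ops with
  | zero => simp [prodPM]; intro h; subst h; simp
  | succ n ih =>
    constructor
    · intro h
      simp [prodPM] at h
      rcases h with ⟨rest, hr, hops⟩ | ⟨rest, hr, hops⟩ <;>
        obtain ⟨hl, hc⟩ := ih.mp hr <;> subst hops <;>
        simp [hl] <;> intro c hc' <;> exact hc c hc'
    · rintro ⟨hl, hc⟩
      cases ops with
      | nil => simp at hl
      | cons c t =>
        simp at hl
        have hct : t ∈ prodPM n := ih.mpr ⟨hl, fun x hx => hc x (by simp [hx])⟩
        have := hc c (by simp)
        rcases this with h | h <;> subst h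
        · exact List.mem_flatMap.mpr ⟨'+', by simp, List.mem_map.mpr ⟨t, hct, rfl⟩⟩
        · exact List.mem_flatMap.mpr ⟨'*', by simp, List.mem_map.mpr ⟨t, hct, rfl⟩⟩

-- the indexed loop of validated_operation = structural evalZip, when lengths line up
lemma loop_eq_evalZip (ops : List Char) (tail : List Int) (r v0 : Int)
    (h : ops.length = tail.length) :
    (List.range ops.length).foldl
      (fun result i =>
        if ops.getD i ' ' = '+' then result + (v0 :: tail).getD (i + 1) 0
        else if ops.getD i ' ' = '*' then result * (v0 :: tail).getD (i + 1) 0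
        else result) r
    = evalZip r (ops.zip tail) := by
  induction ops generalizing tail r with
  | nil => simp [evalZip]
  | cons c t ih =>
    cases tail with
    | nil => simp at h
    | cons v ts =>
      simp only [List.length_cons] at h ⊢
      rw [List.range_succ_eq_map]
      simp only [List.foldl_cons, List.foldl_map]
      simp only [List.getD_cons_zero, List.getD_cons_succ]
      simp only [List.getD_cons_succ] at ih
      rw [List.zip_cons_cons, evalZip]
      exact ih ts _ (by omega)

lemma mem_reachStep (S : PySem.Set Int) (v x : Int) :
    x ∈ reachStep S v ↔ ∃ r ∈ S, x = r + v ∨ x = r * v := by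
  simp only [reachStep, PySem.Set.mem_union, PySem.Set.mem_ofList, List.mem_map]
  constructor
  · rintro (⟨r, hr, rfl⟩ | ⟨r, hr, rfl⟩)
    · exact ⟨r, hr, Or.inl rfl⟩
    · exact ⟨r, hr, Or.inr rfl⟩
  · rintro ⟨r, hr, rfl | rfl⟩
    · exact Or.inl ⟨r, hr, rfl⟩
    · exact Or.inr ⟨r, hr, rfl⟩

lemma mem_reach (rest : List Int) (S : PySem.Set Int) (x : Int) :
    x ∈ rest.foldl reachStep S ↔
      ∃ r ∈ S, ∃ ops, ops ∈ prodPM rest.length ∧ evalZip r (ops.zip rest) = x := by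
  induction rest generalizing S with
  | nil =>
    simp only [List.foldl_nil, List.length_nil]
    constructor
    · intro hx
      exact ⟨x, hx, [], by simp [prodPM], rfl⟩
    · rintro ⟨r, hr, ops, hops, hx⟩
      have : ops = [] := by simpa [prodPM] using hops
      subst this
      simpa [evalZip] using hx ▸ hr
  | cons v vs ih =>
    simp only [List.foldl_cons, List.length_cons]
    rw [ih]
    constructor
    · rintro ⟨r', hr', ops, hops, hx⟩
      obtain ⟨r, hr, hcase⟩ := (mem_reachStep S v r').mp hr'
      obtain ⟨hlen, hchars⟩ := mem_prodPM.mp hops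
      rcases hcase with rfl | rfl
      · refine ⟨r, hr, '+' :: ops, mem_prodPM.mpr ⟨by simp [hlen], ?_⟩, by simpa [evalZip] using hx⟩
        intro c hc; rw [List.mem_cons] at hc
        rcases hc with rfl | hc
        · exact Or.inl rfl
        · exact hchars c hc
      · refine ⟨r, hr, '*' :: ops, mem_prodPM.mpr ⟨by simp [hlen], ?_⟩, by simpa [evalZip] using hx⟩
        intro c hc; rw [List.mem_cons] at hc
        rcases hc with rfl | hc
        · exact Or.inr rfl
        · exact hchars c hc
    · rintro ⟨r, hr, ops, hops, hx⟩
      obtain ⟨hlen, hchars⟩ := mem_prodPM.mp hops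
      cases ops with
      | nil => simp at hlen
      | cons c t =>
        simp only [List.length_cons] at hlen
        have hct : t ∈ prodPM vs.length := mem_prodPM.mpr ⟨by omega, fun x hx => hchars x (by simp [hx])⟩
        have hc := hchars c (by simp)
        rcases hc with rfl | rfl
        · exact ⟨r + v, (mem_reachStep S v _).mpr ⟨r, hr, Or.inl rfl⟩, t, hct,
            by simpa [evalZip] using hx⟩
        · exact ⟨r * v, (mem_reachStep S v _).mpr ⟨r, hr, Or.inr rfl⟩, t, hct,
            by simpa [evalZip] using hx⟩

-- per-line equality: A's tuple search answers exactly "key reachable"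
lemma line_eq (key : Int) (v0 : Int) (rest : List Int) :
    anyValidated key (v0 :: rest) (prodPM rest.length)
      = decide (key ∈ rest.foldl reachStep (PySem.Set.ofList [v0])) := by
  rw [anyValidated_eq_any, Bool.eq_iff_iff]
  simp only [List.any_eq_true, decide_eq_true_eq]
  rw [mem_reach]
  constructor
  · rintro ⟨ops, hops, hval⟩
    have hlen := (mem_prodPM.mp hops).1
    simp only [validated_operation, beq_iff_eq] at hval
    rw [loop_eq_evalZip ops rest _ v0 hlen] at hval
    exact ⟨v0, by simp [PySem.Set.ofList], ops, hops, hval⟩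
  · rintro ⟨r, hr, ops, hops, hx⟩
    have hr0 : r = v0 := by simpa [PySem.Set.ofList] using hr
    have hlen := (mem_prodPM.mp hops).1
    refine ⟨ops, hops, ?_⟩
    simp only [validated_operation, beq_iff_eq]
    rw [loop_eq_evalZip ops rest _ v0 hlen]
    rw [hr0] at hx
    exact hx

-- first-match lookup on an assoc list with distinct keys returns the pair's own value
lemma lookup_of_nodup (l : List (Int × List Int)) (kv : Int × List Int)
    (hnd : (l.map Prod.fst).Nodup) (hmem : kv ∈ l) : l.lookup kv.1 = some kv.2 := by
  induction l with
  | nil => simp at hmem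
  | cons p t ih =>
    simp only [List.map_cons, List.nodup_cons] at hnd
    rw [List.mem_cons] at hmem
    rcases hmem with rfl | hmem
    · simp [List.lookup]
    · have hne : p.1 ≠ kv.1 := by
        intro h
        exact hnd.1 (h ▸ List.mem_map.mpr ⟨kv, hmem, rfl⟩)
      have hb : (kv.1 == p.1) = false := beq_eq_false_iff_ne.mpr (fun h => hne h.symm)
      simp only [List.lookup, hb]
      exact ih hnd.2 hmem

-- ===== VERDICT (by name: the statement is the Claim_ definition above) =====
theorem get_valid_operations_result_spec : Claim_equal_get_valid_operations_result := by
  intro input_file _ hpre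
  unfold Spec_get_valid_operations_result
  unfold get_valid_operations_result get_valid_operations_result_alt
  obtain ⟨hnd, hne⟩ := hpre
  apply PySem.List.foldl_congr_mem
  intro acc kv hmem
  have hlk : input_file.lookup kv.1 = some kv.2 := lookup_of_nodup input_file kv hnd hmem
  obtain ⟨v0, rest, hv⟩ : ∃ v0 rest, kv.2 = v0 :: rest := by
    cases h : kv.2 with
    | nil => exact absurd h (hne kv hmem)
    | cons a b => exact ⟨a, b, rfl⟩
  simp only [hlk, Option.getD_some, hv, List.length_cons, Nat.add_sub_cancel,
    List.getD_cons_zero, List.drop_succ_cons, List.drop_zero]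
  rw [line_eq]
  split_ifs with h1 h2 h2 <;> simp_all
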